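-- pv_equiv track=rewrite | github.com/chang2eee/Coding-Test | 프로그래머스/1/135808. 과일 장수/과일 장수.py | solution
-- ===== SOURCE A (Python) =====
-- def solution(k, m, score):
--     answer = 0
--     score.sort(reverse=True)
--     temp = []
--
--     for i in range(0, len(score), m):
--         temp.append(score[i:i+m])
--
--     for element in temp:
--         if len(element) == m:
--             answer += min(element) * m
--
--     return answer
-- ===== SOURCE B (Python) =====
-- def solution(k, m, score):
--     # Sort in place (same observable mutation as A), then stride straight to
--     # each full group's minimum: in a descending list the minimum of the group
--     # of m consecutive elements is its last element, at indices m-1, 2m-1, ...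
--     score.sort(reverse=True)
--     answer = 0
--     for i in range(m - 1, len(score), m):
--         answer += score[i] * m
--     return answer
-- ===== Notes on version B (the rewrite author's own statement) =====
-- stated objective: simpler
-- what changed: Instead of building a temp list of m-sized slices and calling min() on every full slice, B strides directly over indices m-1, 2m-1, ... of the descending-sorted list, where each full group's minimum sits, accumulating in one loop with no intermediate lists and no min scans.
import Mathlib
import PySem

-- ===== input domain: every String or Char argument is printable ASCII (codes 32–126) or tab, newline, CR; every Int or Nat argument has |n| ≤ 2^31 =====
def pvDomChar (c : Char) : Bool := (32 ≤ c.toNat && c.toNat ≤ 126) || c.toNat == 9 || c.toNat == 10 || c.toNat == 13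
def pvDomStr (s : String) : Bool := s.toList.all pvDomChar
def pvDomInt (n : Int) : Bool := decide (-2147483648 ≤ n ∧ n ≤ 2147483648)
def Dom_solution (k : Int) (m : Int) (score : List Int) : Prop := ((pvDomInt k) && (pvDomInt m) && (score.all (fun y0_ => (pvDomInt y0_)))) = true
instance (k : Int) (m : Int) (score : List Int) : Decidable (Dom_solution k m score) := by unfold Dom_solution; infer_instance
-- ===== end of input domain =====

-- B replaces A's temp list of m-sized slices and the min() scan of each full slice by a single
-- stride loop that reads each full group's minimum directly at indices m-1, 2m-1, … of the
-- descending-sorted list. A sorts `score` in place (B does the same); the equivalence proved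
-- here is about the return value.

-- ===== PORT A =====
def solution (k : Int) (m : Int) (score : List Int) : Int :=
  -- answer = 0; score.sort(reverse=True)
  let t := PySem.List.sorted score (fun x => x) true
  -- for i in range(0, len(score), m): temp.append(score[i:i+m])
  let temp := (PySem.List.pyRange 0 (t.length : Int) m).foldl
      (fun acc i => acc ++ [PySem.List.slice t (some i) (some (i + m))]) []
  -- for element in temp: if len(element) == m: answer += min(element) * m
  -- (min(element) is guarded by len(element) == m ≠ 0, so the `.getD 0` arm is unreachable)
  temp.foldl (fun answer element =>
      if (element.length : Int) = m then
        answer + (PySem.List.min? element (fun x => x)).getD 0 * m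
      else answer) 0

-- ===== PORT B =====
def solution_alt (k : Int) (m : Int) (score : List Int) : Int :=
  -- score.sort(reverse=True)
  let t := PySem.List.sorted score (fun x => x) true
  -- for i in range(m - 1, len(score), m): answer += score[i] * m
  -- (every index produced by the range is in bounds, so the `.getD 0` arm is unreachable)
  (PySem.List.pyRange (m - 1) (t.length : Int) m).foldl
      (fun answer i => answer + (PySem.List.pyGet? t i).getD 0 * m) 0

-- ===== PRECONDITION & SPEC =====
-- Pre_ excludes only m = 0, where range(..., m) raises ValueError in both programs.
def Pre_solution (k : Int) (m : Int) (score : List Int) : Prop := m ≠ 0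
instance (k : Int) (m : Int) (score : List Int) : Decidable (Pre_solution k m score) := by unfold Pre_solution; infer_instance
def pvWitness_solution : Int × Int × List Int := (4, 2, [1, 2, 3, 1, 2])

def Spec_solution (k : Int) (m : Int) (score : List Int) (out : Int) : Prop := out = solution_alt k m score
instance (k : Int) (m : Int) (score : List Int) (out : Int) : Decidable (Spec_solution k m score out) := by unfold Spec_solution; infer_instance

-- ===== CLAIM (what is proved, stated in full; the proofs are below) =====
def Claim_equal_solution : Prop := ∀ (k : Int) (m : Int) (score : List Int), Dom_solution k m score → Pre_solution k m score → Spec_solution k m score (solution k m score)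

-- ===== LEMMAS AND PROOFS =====

-- range(a, b, s) is empty for a negative step when a ≤ b
lemma pyRange_neg_nil (a b s : Int) (hs : s < 0) (hab : a ≤ b) : PySem.List.pyRange a b s = [] := by
  simp [PySem.List.pyRange, show ¬ s = 0 by omega, show ¬ 0 < s by omega, show ¬ b < a by omega]

-- a guarded accumulating for-loop is init + a sum of guarded terms
lemma foldl_guard_add {α : Type} (l : List α) (p : α → Prop) [DecidablePred p] (v : α → Int)
    (init : Int) :
    l.foldl (fun acc x => if p x then acc + v x else acc) init
      = init + (l.map (fun x => if p x then v x else 0)).sum := by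
  induction l generalizing init with
  | nil => simp
  | cons x xs ih => by_cases hx : p x <;> simp [hx, ih] <;> ring

-- a sum over range c truncates to range q when all terms from q on vanish
lemma sum_map_range_cut (f : Nat → Int) {q c : Nat} (hqc : q ≤ c) (h0 : ∀ j, q ≤ j → f j = 0) :
    ((List.range c).map f).sum = ((List.range q).map f).sum := by
  induction c with
  | zero => have hq : q = 0 := by omega
            subst hq; rfl
  | succ c ih =>
    rcases Nat.lt_or_ge c q with h | h
    · have hq : q = c + 1 := by omega
      subst hq; rfl
    · rw [List.range_succ, List.map_append, List.sum_append, ih h]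
      simp [h0 c h]

-- the minimum of a length-mn window of a descending list is the window's last element
lemma min_desc_seg (t : List Int) (hp : List.Pairwise (fun a b => b ≤ a) t) (a mn : Nat)
    (hmn : 0 < mn) (hle : a + mn ≤ t.length) :
    PySem.List.min? (List.take mn (List.drop a t)) (fun x => x) = some (t.getD (a + (mn - 1)) 0) := by
  have hlen : (List.take mn (List.drop a t)).length = mn := by
    simp [List.length_take, List.length_drop]; omega
  have hlast_lt : a + (mn - 1) < t.length := by omega
  cases hmv : PySem.List.min? (List.take mn (List.drop a t)) (fun x => x) with
  | none =>
    exfalso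
    rw [PySem.List.min?_eq_none_iff] at hmv
    rw [hmv] at hlen
    simp at hlen; omega
  | some mv =>
    have hmem := PySem.List.min?_mem hmv
    have hmin := PySem.List.min?_isMin hmv
    have hlastg : mn - 1 < (List.take mn (List.drop a t)).length := by omega
    have hgl : (List.take mn (List.drop a t))[mn - 1]'hlastg = t[a + (mn - 1)]'hlast_lt := by
      rw [List.getElem_take, List.getElem_drop]
    have h1 : mv ≤ t[a + (mn - 1)]'hlast_lt := by
      have := hmin _ (List.getElem_mem hlastg)
      rw [hgl] at this
      simpa using this
    obtain ⟨j, hj, hgj⟩ := List.mem_iff_getElem.mp hmem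
    have hjmn : j < mn := by omega
    have hjt : (List.take mn (List.drop a t))[j]'hj = t[a + j]'(by omega) := by
      rw [List.getElem_take, List.getElem_drop]
    have h2 : t[a + (mn - 1)]'hlast_lt ≤ mv := by
      rw [← hgj, hjt]
      rcases Nat.lt_or_ge (a + j) (a + (mn - 1)) with hlt | hge
      · exact List.pairwise_iff_getElem.mp hp (a + j) (a + (mn - 1)) (by omega) hlast_lt hlt
      · have hej : a + j = a + (mn - 1) := by omega
        simp [hej]
    have hmveq : mv = t[a + (mn - 1)]'hlast_lt := le_antisymm h1 h2
    rw [hmveq, List.getD_eq_getElem?_getD, List.getElem?_eq_getElem hlast_lt]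
    rfl

-- both sums over range collapse to the same sum over the number q of full groups
lemma sum_eq_sum_of_cut {f g : Nat → Int} {q cA cB : Nat} (hqA : q ≤ cA) (hB : cB = q)
    (h0 : ∀ j, q ≤ j → f j = 0) (hfg : ∀ j, j < q → f j = g j) :
    0 + ((List.range cA).map f).sum = 0 + ((List.range cB).map g).sum := by
  subst hB
  rw [sum_map_range_cut f hqA h0]
  congr 1
  exact congrArg List.sum (List.map_congr_left fun a ha => hfg a (List.mem_range.mp ha))

theorem solution_eq (k m : Int) (score : List Int) (hm : m ≠ 0) :
    solution k m score = solution_alt k m score := by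
  simp only [solution, solution_alt]
  set t := PySem.List.sorted score (fun x => x) true with ht
  rcases lt_or_gt_of_ne hm with hneg | hpos
  · have h0len : (0 : Int) ≤ (t.length : Int) := by exact_mod_cast Nat.zero_le _
    rw [pyRange_neg_nil _ _ _ hneg h0len, pyRange_neg_nil _ _ _ hneg (by omega)]
    rfl
  · -- m > 0
    set mn := m.toNat with hmndef
    have hm' : (mn : Int) = m := Int.toNat_of_nonneg hpos.le
    have hmnpos : 0 < mn := by omega
    set N := t.length with hN
    have hp : List.Pairwise (fun a b : Int => b ≤ a) t := by
      have h := PySem.List.sorted_pairwise_rev score (fun x : Int => x)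
      rw [← ht] at h
      simpa using h
    rw [PySem.List.foldl_append_singleton_eq_map, List.nil_append]
    rw [PySem.List.pyRange_of_pos _ _ hpos, PySem.List.pyRange_of_pos _ _ hpos]
    simp only [List.foldl_map]
    rw [foldl_guard_add, PySem.List.foldl_add]
    set q := N / mn with hq
    have hcB : (if m - 1 < (N : Int) then (((N : Int) - (m - 1) + m - 1) / m).toNat else 0) = q := by
      by_cases h : m - 1 < (N : Int)
      · rw [if_pos h]
        have h1 : ((N : Int) - (m - 1) + m - 1 : Int) = (N : Int) := by ring
        rw [h1, ← hm', ← Int.natCast_div, Int.toNat_natCast, hq]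
      · rw [if_neg h]
        have hlt : N < mn := by omega
        rw [hq, Nat.div_eq_of_lt hlt]
    have hqcA : q ≤ (if (0 : Int) < (N : Int) then (((N : Int) - 0 + m - 1) / m).toNat else 0) := by
      by_cases h : (0 : Int) < (N : Int)
      · rw [if_pos h]
        have h1 : ((N : Int) - 0 + m - 1 : Int) = ((N + mn - 1 : Nat) : Int) := by omega
        rw [h1, ← hm', ← Int.natCast_div, Int.toNat_natCast, hq]
        exact Nat.div_le_div_right (by omega)
      · rw [if_neg h]
        have hN0 : N = 0 := by omega
        rw [hq, hN0]
        simp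
    refine sum_eq_sum_of_cut hqcA hcB ?_ ?_
    · -- terms beyond the q full groups vanish: the slice is shorter than m
      intro j hj
      have hidx2 : (0 : Int) + m * (j : Int) + m = ((mn * j : Nat) : Int) + ((mn : Nat) : Int) := by
        push_cast [hm']; ring
      have hidx : (0 : Int) + m * (j : Int) = ((mn * j : Nat) : Int) := by
        push_cast [hm']; ring
      rw [hidx2, hidx, PySem.List.slice_natCast_add]
      rw [if_neg]
      simp only [List.length_take, List.length_drop, ← hN]
      intro hc
      have hmin_eq : min mn (N - mn * j) = mn := by omega
      have h2 : mn * j + mn ≤ N := by omega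
      have h3 : (j + 1) * mn ≤ N := by
        have hh : (j + 1) * mn = mn * j + mn := by ring
        omega
      have h4 : j + 1 ≤ N / mn := (Nat.le_div_iff_mul_le hmnpos).mpr h3
      omega
    · -- each of the q full groups contributes min(group) * m = t[mn*j + (mn-1)] * m
      intro j hj
      have h4 : j + 1 ≤ N / mn := by omega
      have h3 := (Nat.le_div_iff_mul_le hmnpos).mp h4
      have hfull : mn * j + mn ≤ N := by
        have hh : (j + 1) * mn = mn * j + mn := by ring
        omega
      have hidx2 : (0 : Int) + m * (j : Int) + m = ((mn * j : Nat) : Int) + ((mn : Nat) : Int) := by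
        push_cast [hm']; ring
      have hidx : (0 : Int) + m * (j : Int) = ((mn * j : Nat) : Int) := by
        push_cast [hm']; ring
      rw [hidx2, hidx, PySem.List.slice_natCast_add]
      have hcond : ((List.take mn (List.drop (mn * j) t)).length : Int) = m := by
        simp only [List.length_take, List.length_drop, ← hN]
        omega
      rw [if_pos hcond, min_desc_seg t hp (mn * j) mn hmnpos (by omega), Option.getD_some]
      have h1 : ((mn - 1 : Nat) : Int) = m - 1 := by omega
      have hidxB : m - 1 + m * (j : Int) = ((mn * j + (mn - 1) : Nat) : Int) := by
        push_cast [h1, hm']; ring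
      have hlt : mn * j + (mn - 1) < t.length := by omega
      rw [hidxB, PySem.List.pyGet?_natCast, List.getElem?_eq_getElem hlt, Option.getD_some]
      rw [List.getD_eq_getElem?_getD, List.getElem?_eq_getElem hlt, Option.getD_some]

-- ===== VERDICT (by name: the statement is the Claim_ definition above) =====
theorem solution_spec : Claim_equal_solution := by
  intro k m score _hdom hpre
  unfold Spec_solution
  exact solution_eq k m score hpre
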